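-- pv_equiv track=rewrite | github.com/yshiyi/LeetCode | Merge Interval/1229M. Meeting Scheduler.py | meetingScheduler
-- ===== SOURCE A (Python) =====
-- def meetingScheduler(slot1, slot2, d):
--     slot1.sort()
--     slot2.sort()
--     i, j = 0, 0
--     while i<len(slot1) and j<len(slot2):
--         if slot1[i][1] < slot2[j][0]+d:
--             i += 1
--             continue
--         if slot2[j][1] < slot1[i][0]+d:
--             j += 1
--             continue
--         starting = max(slot1[i][0], slot2[j][0])
--         ending = min(slot1[i][1], slot2[j][1])
--         if starting+d<=ending:
--             return [starting, starting+d]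
--         if slot1[i][1] < slot2[j][1]:
--             i += 1
--         else:
--             j += 1
--     return []
-- ===== SOURCE B (Python) =====
-- def meetingScheduler(slot1, slot2, d):
--     slot1.sort()
--     slot2.sort()
--     best = None
--     for a in slot1:
--         for b in slot2:
--             s = max(a[0], b[0])
--             e = min(a[1], b[1])
--             if s + d <= e and (best is None or s < best):
--                 best = s
--     return [] if best is None else [best, best + d]
-- ===== Notes on version B (the rewrite author's own statement) =====
-- stated objective: alternative
-- what changed: replaces A's sorted two-pointer sweep with a brute-force scan over all slot pairs that keeps the minimum valid start (both keep the in-place sorts)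
-- outside the precondition, e.g. on meetingScheduler([[0, 10]], [[0, 10], [5]], 1): A returns [0, 1], B raises IndexError
import Mathlib
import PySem

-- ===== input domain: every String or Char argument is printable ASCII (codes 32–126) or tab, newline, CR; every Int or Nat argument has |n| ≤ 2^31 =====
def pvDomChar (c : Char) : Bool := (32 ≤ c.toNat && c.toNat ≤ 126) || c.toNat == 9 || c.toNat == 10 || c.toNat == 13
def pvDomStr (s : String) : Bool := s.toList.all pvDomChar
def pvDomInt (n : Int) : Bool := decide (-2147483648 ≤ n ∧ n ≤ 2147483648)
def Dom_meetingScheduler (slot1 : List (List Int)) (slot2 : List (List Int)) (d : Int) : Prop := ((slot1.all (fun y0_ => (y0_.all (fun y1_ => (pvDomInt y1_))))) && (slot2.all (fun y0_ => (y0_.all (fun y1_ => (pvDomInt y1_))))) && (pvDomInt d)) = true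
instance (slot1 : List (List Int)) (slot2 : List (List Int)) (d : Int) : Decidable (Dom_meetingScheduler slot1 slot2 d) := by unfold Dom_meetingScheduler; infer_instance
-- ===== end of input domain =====

-- B replaces A's sorted two-pointer sweep by a brute-force minimum over all slot pairs
-- (same in-place sorts kept for the side effect); objective: alternative, not faster.
-- Both A and B sort their list arguments in place; the equivalence proved here is about the return value.

-- ===== PORT A =====
-- l[k] on an inner slot; total form, exact under Pre_ (inner slots have length ≥ 2 wherever accessed)
def pvIdx (l : List Int) (k : Int) : Int := PySem.List.pyGetD l k 0

-- slot.sort(): Python's in-place sort of a list of lists, lexicographic ('<' of List Int)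
def pvSort (xs : List (List Int)) : List (List Int) :=
  @PySem.List.sorted (List Int) (List Int) List.instLinearOrder.toLT LinearOrder.toDecidableLT xs (fun x => x) false

-- the while loop of A over indices i, j
def pvALoop (s1 s2 : List (List Int)) (d : Int) (i j : Nat) : List Int :=
  if h : i < s1.length ∧ j < s2.length then
    if pvIdx s1[i] 1 < pvIdx s2[j] 0 + d then pvALoop s1 s2 d (i+1) j
    else if pvIdx s2[j] 1 < pvIdx s1[i] 0 + d then pvALoop s1 s2 d i (j+1)
    else
      let starting := max (pvIdx s1[i] 0) (pvIdx s2[j] 0)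
      let ending := min (pvIdx s1[i] 1) (pvIdx s2[j] 1)
      if starting + d ≤ ending then [starting, starting + d]
      else if pvIdx s1[i] 1 < pvIdx s2[j] 1 then pvALoop s1 s2 d (i+1) j
      else pvALoop s1 s2 d i (j+1)
  else []
termination_by (s1.length - i) + (s2.length - j)
decreasing_by
  · exact Nat.add_lt_add_right (Nat.sub_succ_lt_self _ _ h.1) _
  · exact Nat.add_lt_add_left (Nat.sub_succ_lt_self _ _ h.2) _
  · exact Nat.add_lt_add_right (Nat.sub_succ_lt_self _ _ h.1) _
  · exact Nat.add_lt_add_left (Nat.sub_succ_lt_self _ _ h.2) _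

def meetingScheduler (slot1 : List (List Int)) (slot2 : List (List Int)) (d : Int) : List Int :=
  pvALoop (pvSort slot1) (pvSort slot2) d 0 0

-- ===== PORT B =====
-- 'best is None or s < best: best = s' of B
def pvBestUpd (best : Option Int) (s : Int) : Option Int :=
  match best with
  | none => some s
  | some m => if s < m then some s else some m

-- B's inner 'for b in slot2' loop
def pvBInner (d : Int) (a : List Int) (best : Option Int) (y : List (List Int)) : Option Int :=
  y.foldl (fun best b =>
    let s := max (pvIdx a 0) (pvIdx b 0)
    let e := min (pvIdx a 1) (pvIdx b 1)
    if s + d ≤ e then pvBestUpd best s else best) best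

def meetingScheduler_alt (slot1 : List (List Int)) (slot2 : List (List Int)) (d : Int) : List Int :=
  let s1 := pvSort slot1
  let s2 := pvSort slot2
  match s1.foldl (fun best a => pvBInner d a best s2) none with
  | none => []
  | some m => [m, m + d]

-- ===== PRECONDITION & SPEC =====
-- Pre_ excludes inputs where both outer lists are nonempty and some inner slot has fewer than
-- 2 entries: A raises IndexError on the inner slots it reaches (and on the few such inputs where
-- an early return happens first, A returns a value while B's natural brute force still raises).
def Pre_meetingScheduler (slot1 : List (List Int)) (slot2 : List (List Int)) (d : Int) : Prop :=
  slot1 = [] ∨ slot2 = [] ∨ ((∀ l ∈ slot1, 2 ≤ l.length) ∧ (∀ l ∈ slot2, 2 ≤ l.length))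
instance (slot1 : List (List Int)) (slot2 : List (List Int)) (d : Int) : Decidable (Pre_meetingScheduler slot1 slot2 d) := by unfold Pre_meetingScheduler; infer_instance

def pvWitness_meetingScheduler : List (List Int) × List (List Int) × Int := ([[0,3]], [[2,9]], 2)

def Spec_meetingScheduler (slot1 : List (List Int)) (slot2 : List (List Int)) (d : Int) (out : List Int) : Prop := out = meetingScheduler_alt slot1 slot2 d
instance (slot1 : List (List Int)) (slot2 : List (List Int)) (d : Int) (out : List Int) : Decidable (Spec_meetingScheduler slot1 slot2 d out) := by unfold Spec_meetingScheduler; infer_instance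

-- ===== CLAIM (what is proved, stated in full; the proofs are below) =====
def Claim_equal_meetingScheduler : Prop := ∀ (slot1 : List (List Int)) (slot2 : List (List Int)) (d : Int), Dom_meetingScheduler slot1 slot2 d → Pre_meetingScheduler slot1 slot2 d → Spec_meetingScheduler slot1 slot2 d (meetingScheduler slot1 slot2 d)

-- ===== LEMMAS AND PROOFS =====

-- the start of the pair (a, b) if it can host a meeting of length d
def pvPair (d : Int) (a b : List Int) : Option Int :=
  if max (pvIdx a 0) (pvIdx b 0) + d ≤ min (pvIdx a 1) (pvIdx b 1)
  then some (max (pvIdx a 0) (pvIdx b 0)) else none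

-- all valid starts, over all pairs
def pvStarts (d : Int) (x y : List (List Int)) : List Int :=
  x.flatMap (fun a => y.filterMap (pvPair d a))

-- minimum of a list of starts, in B's accumulator shape
def pvM (L : List Int) : Option Int := L.foldl pvBestUpd none

-- A's while loop, rephrased on the suffix lists it actually inspects
def pvLoopL (d : Int) : List (List Int) → List (List Int) → List Int
  | a :: x, b :: y =>
    if pvIdx a 1 < pvIdx b 0 + d then pvLoopL d x (b :: y)
    else if pvIdx b 1 < pvIdx a 0 + d then pvLoopL d (a :: x) y
    else
      if max (pvIdx a 0) (pvIdx b 0) + d ≤ min (pvIdx a 1) (pvIdx b 1)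
      then [max (pvIdx a 0) (pvIdx b 0), max (pvIdx a 0) (pvIdx b 0) + d]
      else if pvIdx a 1 < pvIdx b 1 then pvLoopL d x (b :: y)
      else pvLoopL d (a :: x) y
  | _, _ => []
termination_by x y => x.length + y.length
decreasing_by
  · exact Nat.add_lt_add_right (Nat.lt_succ_self _) _
  · exact Nat.add_lt_add_left (Nat.lt_succ_self _) _
  · exact Nat.add_lt_add_right (Nat.lt_succ_self _) _
  · exact Nat.add_lt_add_left (Nat.lt_succ_self _) _

lemma pvLoopL_nil_left (d : Int) (y : List (List Int)) : pvLoopL d [] y = [] := by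
  rw [pvLoopL.eq_def]

lemma pvLoopL_nil_right (d : Int) (x : List (List Int)) : pvLoopL d x [] = [] := by
  rw [pvLoopL.eq_def]; cases x <;> rfl

lemma pvBestUpd_some (m s : Int) : pvBestUpd (some m) s = some (min m s) := by
  simp only [pvBestUpd, min_def]
  split <;> split <;> first | rfl | omega

lemma foldl_bestUpd_some (L : List Int) : ∀ m, L.foldl pvBestUpd (some m) = some (L.foldl min m) := by
  induction L with
  | nil => intro m; rfl
  | cons s L ih => intro m; simp only [List.foldl_cons, pvBestUpd_some]; exact ih (min m s)

lemma pvM_cons (s : Int) (L : List Int) : pvM (s :: L) = some (L.foldl min s) := by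
  simp only [pvM, List.foldl_cons]
  exact foldl_bestUpd_some L s

lemma pvM_eq_some_of_min {L : List Int} {m : Int} (h1 : m ∈ L) (h2 : ∀ s ∈ L, m ≤ s) :
    pvM L = some m := by
  cases L with
  | nil => simp at h1
  | cons s L =>
    rw [pvM_cons]
    have hmem := PySem.List.foldl_min_mem L s
    have hle := PySem.List.foldl_min_le L s
    have h1' : m ≤ L.foldl min s := by
      rcases hmem with h | h
      · rw [h]; exact h2 s (by simp)
      · exact h2 _ (by simp [h])
    have h2' : L.foldl min s ≤ m := by
      rcases List.mem_cons.mp h1 with h | h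
      · exact h ▸ hle.1
      · exact hle.2 m h
    exact congrArg some (le_antisymm h2' h1')

lemma pvBInner_eq (d : Int) (a : List Int) (y : List (List Int)) : ∀ o,
    pvBInner d a o y = (y.filterMap (pvPair d a)).foldl pvBestUpd o := by
  induction y with
  | nil => intro o; rfl
  | cons b y ih =>
    intro o
    by_cases h : max (pvIdx a 0) (pvIdx b 0) + d ≤ min (pvIdx a 1) (pvIdx b 1)
    · have hp : pvPair d a b = some (max (pvIdx a 0) (pvIdx b 0)) := if_pos h
      simp only [pvBInner, List.foldl_cons, List.filterMap_cons, hp]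
      rw [if_pos h]
      simpa [pvBInner] using ih _
    · have hp : pvPair d a b = none := if_neg h
      simp only [pvBInner, List.foldl_cons, List.filterMap_cons, hp]
      rw [if_neg h]
      simpa [pvBInner] using ih _

lemma pvBFold_eq (d : Int) (y : List (List Int)) : ∀ (x : List (List Int)) o,
    x.foldl (fun best a => pvBInner d a best y) o = (pvStarts d x y).foldl pvBestUpd o := by
  intro x
  induction x with
  | nil => intro o; rfl
  | cons a x ih =>
    intro o
    simp only [List.foldl_cons, pvStarts, List.flatMap_cons, List.foldl_append]
    rw [pvBInner_eq, ih]
    rfl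

lemma pvAlt_eq (slot1 slot2 : List (List Int)) (d : Int) :
    meetingScheduler_alt slot1 slot2 d =
      match pvM (pvStarts d (pvSort slot1) (pvSort slot2)) with
      | none => []
      | some m => [m, m + d] := by
  simp only [meetingScheduler_alt, pvM]
  rw [pvBFold_eq]

-- A's index loop computes the suffix-list loop
lemma pvALoop_eq (s1 s2 : List (List Int)) (d : Int) : ∀ n i j, s1.length - i + (s2.length - j) ≤ n →
    pvALoop s1 s2 d i j = pvLoopL d (s1.drop i) (s2.drop j) := by
  intro n
  induction n with
  | zero =>
    intro i j hn
    have h1 : s1.length ≤ i := by omega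
    rw [pvALoop, dif_neg (by omega : ¬(i < s1.length ∧ j < s2.length)),
      List.drop_eq_nil_of_le h1, pvLoopL_nil_left]
  | succ n ih =>
    intro i j hn
    by_cases h : i < s1.length ∧ j < s2.length
    · obtain ⟨h1, h2⟩ := h
      rw [pvALoop, List.drop_eq_getElem_cons h1, List.drop_eq_getElem_cons h2, pvLoopL]
      simp only [dif_pos (And.intro h1 h2)]
      split
      · rw [ih (i+1) j (by omega), List.drop_eq_getElem_cons h2]
      · split
        · rw [ih i (j+1) (by omega), List.drop_eq_getElem_cons h1]
        · split
          · rfl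
          · split
            · rw [ih (i+1) j (by omega), List.drop_eq_getElem_cons h2]
            · rw [ih i (j+1) (by omega), List.drop_eq_getElem_cons h1]
    · rw [pvALoop]
      rw [dif_neg h]
      by_cases h1 : i < s1.length
      · have h2 : ¬ j < s2.length := fun hj => h ⟨h1, hj⟩
        rw [show List.drop j s2 = [] from List.drop_eq_nil_of_le (by omega), pvLoopL_nil_right]
      · rw [show List.drop i s1 = [] from List.drop_eq_nil_of_le (by omega), pvLoopL_nil_left]

-- first component is monotone along the sorted order (inner slots nonempty)
lemma pvFirst_mono {a b : List Int} (ha : a ≠ []) (h : a ≤ b) : pvIdx a 0 ≤ pvIdx b 0 := by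
  match a, b with
  | x :: s, [] => exact absurd h (by simp)
  | x :: s, y :: t =>
    have hx : pvIdx (x :: s) 0 = x := PySem.List.pyGetD_zero_cons x s 0
    have hy : pvIdx (y :: t) 0 = y := PySem.List.pyGetD_zero_cons y t 0
    rw [hx, hy]
    rcases lt_or_eq_of_le h with h | h
    · exact List.head_le_of_lt h
    · injection h with h1 _; omega

lemma pvStarts_cons_left_none {d : Int} {a : List Int} {x y : List (List Int)}
    (h : ∀ b ∈ y, pvPair d a b = none) : pvStarts d (a :: x) y = pvStarts d x y := by
  simp only [pvStarts, List.flatMap_cons]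
  rw [List.filterMap_eq_nil_iff.mpr h, List.nil_append]

lemma pvStarts_cons_right_none {d : Int} {b : List Int} {x y : List (List Int)}
    (h : ∀ a ∈ x, pvPair d a b = none) : pvStarts d x (b :: y) = pvStarts d x y := by
  simp only [pvStarts]
  induction x with
  | nil => rfl
  | cons a x ih =>
    simp only [List.flatMap_cons]
    rw [List.filterMap_cons_none (h a (by simp)), ih (fun a' ha' => h a' (by simp [ha']))]

-- the main invariant: A's sweep returns the minimum valid start over all pairs
lemma pvMain (d : Int) : ∀ n (x y : List (List Int)), x.length + y.length ≤ n →
    (∀ a ∈ x, a ≠ []) → (∀ b ∈ y, b ≠ []) →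
    x.Pairwise (· ≤ ·) → y.Pairwise (· ≤ ·) →
    pvLoopL d x y = (match pvM (pvStarts d x y) with
                     | none => []
                     | some m => [m, m + d]) := by
  intro n
  induction n with
  | zero =>
    intro x y hn _ _ _ _
    obtain rfl : x = [] := by cases x with | nil => rfl | cons a t => simp at hn
    rw [pvLoopL_nil_left]; rfl
  | succ n ih =>
    intro x y hn hxe hye hxs hys
    match x, y with
    | [], y => rw [pvLoopL_nil_left]; rfl
    | a :: x, [] =>
      have h0 : pvStarts d (a :: x) [] = [] := List.flatMap_eq_nil_iff.mpr (by simp)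
      rw [pvLoopL_nil_right, h0]; rfl
    | a :: x, b :: y =>
      have ha0 : ∀ a' ∈ a :: x, pvIdx a 0 ≤ pvIdx a' 0 := by
        intro a' ha'
        rcases List.mem_cons.mp ha' with h | h
        · subst h; exact le_refl _
        · exact pvFirst_mono (hxe a (by simp)) (List.rel_of_pairwise_cons hxs h)
      have hb0 : ∀ b' ∈ b :: y, pvIdx b 0 ≤ pvIdx b' 0 := by
        intro b' hb'
        rcases List.mem_cons.mp hb' with h | h
        · subst h; exact le_refl _
        · exact pvFirst_mono (hye b (by simp)) (List.rel_of_pairwise_cons hys h)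
      rw [pvLoopL]
      by_cases h1 : pvIdx a 1 < pvIdx b 0 + d
      · rw [if_pos h1]
        have hdrop : ∀ b' ∈ b :: y, pvPair d a b' = none := by
          intro b' hb'
          have := hb0 b' hb'
          simp only [pvPair, ite_eq_right_iff]
          intro hc
          have := min_le_left (pvIdx a 1) (pvIdx b' 1)
          have := le_max_right (pvIdx a 0) (pvIdx b' 0)
          omega
        rw [pvStarts_cons_left_none hdrop]
        exact ih x (b :: y) (by simp at hn ⊢; omega) (fun a' h => hxe a' (by simp [h]))
          hye hxs.of_cons hys
      · rw [if_neg h1]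
        by_cases h2 : pvIdx b 1 < pvIdx a 0 + d
        · rw [if_pos h2]
          have hdrop : ∀ a' ∈ a :: x, pvPair d a' b = none := by
            intro a' ha'
            have := ha0 a' ha'
            simp only [pvPair, ite_eq_right_iff]
            intro hc
            have := min_le_right (pvIdx a' 1) (pvIdx b 1)
            have := le_max_left (pvIdx a' 0) (pvIdx b 0)
            omega
          rw [pvStarts_cons_right_none hdrop]
          exact ih (a :: x) y (by simp at hn ⊢; omega) hxe
            (fun b' h => hye b' (by simp [h])) hxs hys.of_cons
        · rw [if_neg h2]
          by_cases h3 : max (pvIdx a 0) (pvIdx b 0) + d ≤ min (pvIdx a 1) (pvIdx b 1)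
          · rw [if_pos h3]
            have hmem : max (pvIdx a 0) (pvIdx b 0) ∈ pvStarts d (a :: x) (b :: y) := by
              simp only [pvStarts, List.mem_flatMap]
              exact ⟨a, by simp, List.mem_filterMap.mpr ⟨b, by simp, by simp [pvPair, h3]⟩⟩
            have hmin : ∀ s ∈ pvStarts d (a :: x) (b :: y), max (pvIdx a 0) (pvIdx b 0) ≤ s := by
              intro s hs
              simp only [pvStarts, List.mem_flatMap, List.mem_filterMap] at hs
              obtain ⟨a', ha', b', hb', hp⟩ := hs
              simp only [pvPair, ite_eq_iff] at hp
              rcases hp with ⟨_, hp⟩ | ⟨_, hp⟩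
              · have := ha0 a' ha'
                have := hb0 b' hb'
                have h4 := le_max_left (pvIdx a' 0) (pvIdx b' 0)
                have h5 := le_max_right (pvIdx a' 0) (pvIdx b' 0)
                injection hp with hp
                omega
              · exact absurd hp (by simp)
            rw [pvM_eq_some_of_min hmem hmin]
          · rw [if_neg h3]
            by_cases h4 : pvIdx a 1 < pvIdx b 1
            · rw [if_pos h4]
              have hdrop : ∀ b' ∈ b :: y, pvPair d a b' = none := by
                intro b' hb'
                have := hb0 b' hb'
                simp only [pvPair, ite_eq_right_iff]
                intro hc
                have := min_le_left (pvIdx a 1) (pvIdx b' 1)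
                have h5 := le_max_right (pvIdx a 0) (pvIdx b 0)
                have h6 := le_max_left (pvIdx a 0) (pvIdx b 0)
                have h7 := le_max_left (pvIdx a 0) (pvIdx b' 0)
                have h8 : min (pvIdx a 1) (pvIdx b 1) = pvIdx a 1 := by omega
                have h9 : max (pvIdx a 0) (pvIdx b 0) ≤ max (pvIdx a 0) (pvIdx b' 0) := by
                  simp only [max_le_iff]; constructor <;> omega
                omega
              rw [pvStarts_cons_left_none hdrop]
              exact ih x (b :: y) (by simp at hn ⊢; omega) (fun a' h => hxe a' (by simp [h]))
                hye hxs.of_cons hys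
            · rw [if_neg h4]
              have hdrop : ∀ a' ∈ a :: x, pvPair d a' b = none := by
                intro a' ha'
                have := ha0 a' ha'
                simp only [pvPair, ite_eq_right_iff]
                intro hc
                have := min_le_right (pvIdx a' 1) (pvIdx b 1)
                have h5 := le_max_left (pvIdx a 0) (pvIdx b 0)
                have h6 := le_max_right (pvIdx a 0) (pvIdx b 0)
                have h7 := le_max_right (pvIdx a' 0) (pvIdx b 0)
                have h8 : min (pvIdx a 1) (pvIdx b 1) = pvIdx b 1 := by omega
                have h9 : max (pvIdx a 0) (pvIdx b 0) ≤ max (pvIdx a' 0) (pvIdx b 0) := by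
                  simp only [max_le_iff]; constructor <;> omega
                omega
              rw [pvStarts_cons_right_none hdrop]
              exact ih (a :: x) y (by simp at hn ⊢; omega) hxe
                (fun b' h => hye b' (by simp [h])) hxs hys.of_cons

-- ===== VERDICT (by name: the statement is the Claim_ definition above) =====
theorem meetingScheduler_spec : Claim_equal_meetingScheduler := by
  intro slot1 slot2 d _ hpre
  unfold Spec_meetingScheduler
  rcases hpre with h | h | ⟨h1, h2⟩
  · subst h
    rw [meetingScheduler, pvAlt_eq]
    have hs1 : pvSort [] = [] := rfl
    rw [hs1, pvALoop_eq _ _ _ (pvSort slot2).length 0 0 (by simp)]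
    rw [show List.drop 0 ([] : List (List Int)) = [] from rfl, pvLoopL_nil_left]
    rfl
  · subst h
    rw [meetingScheduler, pvAlt_eq]
    have hs2 : pvSort [] = [] := rfl
    have h0 : pvStarts d (pvSort slot1) [] = [] := List.flatMap_eq_nil_iff.mpr (by simp)
    rw [hs2, h0, pvALoop_eq _ _ _ (pvSort slot1).length 0 0 (by simp)]
    simp only [List.drop_zero]
    rw [pvLoopL_nil_right]
    rfl
  · rw [meetingScheduler, pvAlt_eq,
      pvALoop_eq _ _ _ ((pvSort slot1).length + (pvSort slot2).length) 0 0 (by omega)]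
    simp only [List.drop_zero]
    exact pvMain d _ _ _ (le_refl _)
      (fun a ha => by
        unfold pvSort at ha
        have := h1 a ((@PySem.List.mem_sorted (List Int) (List Int) List.instLinearOrder.toLT
          LinearOrder.toDecidableLT slot1 (fun x => x) false a).mp ha)
        intro hc; subst hc; simp at this)
      (fun b hb => by
        unfold pvSort at hb
        have := h2 b ((@PySem.List.mem_sorted (List Int) (List Int) List.instLinearOrder.toLT
          LinearOrder.toDecidableLT slot2 (fun x => x) false b).mp hb)
        intro hc; subst hc; simp at this)
      (by unfold pvSort; exact PySem.List.sorted_pairwise slot1 (fun x => x))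
      (by unfold pvSort; exact PySem.List.sorted_pairwise slot2 (fun x => x))
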